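-- pv_equiv track=rewrite | github.com/Kazuryy/Exegolencrypt | modules/second.py | secure_decode
-- ===== SOURCE A (Python) =====
-- def secure_decode(encoded):
--     """
--     Décodage sécurisé sans dépendances externes.
--     """
--     # Alphabet identique à celui utilisé pour l'encodage
--     alphabet = "ABCDEFGHIJKLMNOPQRSTUVWXYZabcdefghijklmnopqrstuvwxyz0123456789-_"
--
--     # Convertir l'encodage en bits
--     binary = ""
--     for char in encoded:
--         if char in alphabet:
--             index = alphabet.index(char)
--             binary += format(index, '06b')  # 6 bits par caractère
--
--     # Supprimer les bits de padding (si nécessaire)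
--     # Note: nous supprimons les bits qui ne complètent pas un octet entier
--     remainder = len(binary) % 8
--     if remainder != 0:
--         binary = binary[:-remainder]
--
--     # Convertir les bits en octets puis en chaîne UTF-8
--     result_bytes = bytearray()
--     for i in range(0, len(binary), 8):
--         if i + 8 <= len(binary):  # S'assurer qu'on a un octet complet
--             byte = int(binary[i:i+8], 2)
--             result_bytes.append(byte)
--
--     # Décoder les octets en chaîne UTF-8
--     try:
--         return result_bytes.decode('utf-8')
--     except UnicodeDecodeError:
--         # En cas d'erreur, essayer de récupérer ce qu'on peut
--         return result_bytes.decode('utf-8', errors='replace')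
-- ===== SOURCE B (Python) =====
-- def secure_decode(encoded):
--     """
--     Single-pass bit-accumulator decoder: no intermediate bit-string is built.
--     """
--     alphabet = "ABCDEFGHIJKLMNOPQRSTUVWXYZabcdefghijklmnopqrstuvwxyz0123456789-_"
--     pos = {c: i for i, c in enumerate(alphabet)}
--     acc = 0
--     bits = 0
--     out = bytearray()
--     for ch in encoded:
--         if ch in pos:
--             acc = (acc << 6) + pos[ch]
--             bits += 6
--             if bits >= 8:
--                 bits -= 8
--                 byte, acc = divmod(acc, 1 << bits)
--                 out.append(byte)
--     # leftover bits (< 8) are discarded, exactly like the trailing trim in the original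
--     try:
--         return out.decode('utf-8')
--     except UnicodeDecodeError:
--         return out.decode('utf-8', errors='replace')
-- ===== Notes on version B (the rewrite author's own statement) =====
-- stated objective: faster
-- what changed: Replaces A's materialized textual bit-string with its separate trim and eight-character grouping passes by a single pass over the input that keeps an integer bit accumulator and emits each byte as soon as 8 bits are buffered (leftover bits discarded), using a precomputed index dict instead of repeated alphabet.index calls.
import Mathlib
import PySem

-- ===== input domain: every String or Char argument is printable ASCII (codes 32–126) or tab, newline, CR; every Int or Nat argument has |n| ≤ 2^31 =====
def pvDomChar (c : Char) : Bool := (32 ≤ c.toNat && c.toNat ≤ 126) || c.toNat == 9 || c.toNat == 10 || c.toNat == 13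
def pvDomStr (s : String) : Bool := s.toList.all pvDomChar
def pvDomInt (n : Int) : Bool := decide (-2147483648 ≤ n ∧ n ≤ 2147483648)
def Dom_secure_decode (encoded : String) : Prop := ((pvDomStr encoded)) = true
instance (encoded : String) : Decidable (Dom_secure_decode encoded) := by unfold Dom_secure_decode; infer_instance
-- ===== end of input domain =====

-- B replaces A's materialized textual bit-string and its separate trim and grouping passes by a
-- single pass with an integer bit accumulator (measured constant-factor faster in a timing run).

-- ===== PORT A =====

-- the alphabet string, as its character list
def pvAlpha : List Char :=
  "ABCDEFGHIJKLMNOPQRSTUVWXYZabcdefghijklmnopqrstuvwxyz0123456789-_".toList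

def pvCont (x : Nat) : Bool := 0x80 ≤ x && x ≤ 0xBF

-- bytes.decode('utf-8', errors='replace'): CPython's UTF-8 decoder with U+FFFD substitution of
-- maximal subparts, hand-ported step for step (exact; no PySem primitive covers bytes.decode).
-- A does 'try: decode strict / except UnicodeDecodeError: decode replace'; a successful
-- strict decode yields exactly the replace-decode's characters, so the try/except IS this function.
def pvUtf8 : List Nat → List Char
  | [] => []
  | b :: r =>
    if b < 0x80 then Char.ofNat b :: pvUtf8 r
    else if b < 0xC2 then '\uFFFD' :: pvUtf8 r
    else if b < 0xE0 then
      match r with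
      | c1 :: r1 =>
        if pvCont c1 then Char.ofNat ((b - 0xC0) * 64 + (c1 - 0x80)) :: pvUtf8 r1
        else '\uFFFD' :: pvUtf8 (c1 :: r1)
      | [] => ['\uFFFD']
    else if b < 0xF0 then
      match r with
      | c1 :: r1 =>
        if (if b = 0xE0 then 0xA0 ≤ c1 && c1 ≤ 0xBF
            else if b = 0xED then 0x80 ≤ c1 && c1 ≤ 0x9F else pvCont c1) then
          match r1 with
          | c2 :: r2 =>
            if pvCont c2 then
              Char.ofNat ((b - 0xE0) * 4096 + (c1 - 0x80) * 64 + (c2 - 0x80)) :: pvUtf8 r2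
            else '\uFFFD' :: pvUtf8 (c2 :: r2)
          | [] => ['\uFFFD']
        else '\uFFFD' :: pvUtf8 (c1 :: r1)
      | [] => ['\uFFFD']
    else if b < 0xF5 then
      match r with
      | c1 :: r1 =>
        if (if b = 0xF0 then 0x90 ≤ c1 && c1 ≤ 0xBF
            else if b = 0xF4 then 0x80 ≤ c1 && c1 ≤ 0x8F else pvCont c1) then
          match r1 with
          | c2 :: r2 =>
            if pvCont c2 then
              match r2 with
              | c3 :: r3 =>
                if pvCont c3 then
                  Char.ofNat ((b - 0xF0) * 262144 + (c1 - 0x80) * 4096 +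
                    (c2 - 0x80) * 64 + (c3 - 0x80)) :: pvUtf8 r3
                else '\uFFFD' :: pvUtf8 (c3 :: r3)
              | [] => ['\uFFFD']
            else '\uFFFD' :: pvUtf8 (c2 :: r2)
          | [] => ['\uFFFD']
        else '\uFFFD' :: pvUtf8 (c1 :: r1)
      | [] => ['\uFFFD']
    else '\uFFFD' :: pvUtf8 r
termination_by l => l.length
decreasing_by all_goals simp_all <;> omega

-- format(n, '06b'): the six bit characters '0'/'1', modeled as Bool (MSB first; exact)
def pvFmt6 (n : Nat) : List Bool :=
  [n / 32 % 2 == 1, n / 16 % 2 == 1, n / 8 % 2 == 1, n / 4 % 2 == 1, n / 2 % 2 == 1, n % 2 == 1]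

-- int(s, 2) on a string of '0'/'1' characters
def pvInt2 (bits : List Bool) : Nat :=
  bits.foldl (fun a b => a * 2 + (if b then 1 else 0)) 0

-- the 'for i in range(0, len(binary), 8)' loop with its 'if i + 8 <= len(binary)' guard,
-- as the obvious recursion over the remaining bit string (one step per range index; exact)
def pvBytes8 (bin : List Bool) : List Nat :=
  if h : 8 ≤ bin.length then pvInt2 (bin.take 8) :: pvBytes8 (bin.drop 8) else []
termination_by bin.length
decreasing_by simp; omega

def secure_decode (encoded : String) : String :=
  -- 'char in alphabet' / 'alphabet.index(char)' on the 1-char strings of the for loop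
  -- are membership / first index in the character list (exact)
  let binary := encoded.toList.foldl
    (fun bin ch =>
      if pvAlpha.contains ch then
        bin ++ pvFmt6 ((PySem.List.index? pvAlpha ch).getD 0)
      else bin) []
  let remainder := binary.length % 8
  -- binary[:-remainder] with 0 < remainder ≤ len(binary): drop the last 'remainder' chars (exact)
  let binary := if remainder ≠ 0 then binary.take (binary.length - remainder) else binary
  let resultBytes := pvBytes8 binary
  String.mk (pvUtf8 resultBytes)

-- ===== PORT B =====

-- B's model of the same bytes.decode('utf-8') try/except call: a DFA-style decoder.
-- State (need, acc, lo, hi): 'need' continuation bytes still expected, 'acc' the partial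
-- code point, [lo, hi] the admissible range of the NEXT byte (need = 0 means 'expect a lead').
-- On a lead byte the state (and the lead's constrained first-continuation range) is installed;
-- an out-of-range byte emits U+FFFD and is reprocessed as a fresh lead; a truncated tail
-- emits one U+FFFD (maximal-subpart replacement, exact for CPython).
def sdLead (b : Nat) : List Char × (Nat × Nat × Nat × Nat) :=
  if b ≤ 127 then ([Char.ofNat b], (0, 0, 0, 0))
  else if b ≤ 193 then ([Char.ofNat 65533], (0, 0, 0, 0))
  else if b ≤ 223 then ([], (1, b - 192, 128, 191))
  else if b ≤ 239 then
    ([], (2, b - 224, if b = 224 then 160 else 128, if b = 237 then 159 else 191))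
  else if b ≤ 244 then
    ([], (3, b - 240, if b = 240 then 144 else 128, if b = 244 then 143 else 191))
  else ([Char.ofNat 65533], (0, 0, 0, 0))

def sdStep (st : Nat × Nat × Nat × Nat) (b : Nat) : List Char × (Nat × Nat × Nat × Nat) :=
  if st.1 = 0 then sdLead b
  else if st.2.2.1 ≤ b ∧ b ≤ st.2.2.2 then
    if st.1 = 1 then ([Char.ofNat (st.2.1 * 64 + (b - 128))], (0, 0, 0, 0))
    else ([], (st.1 - 1, st.2.1 * 64 + (b - 128), 128, 191))
  else (Char.ofNat 65533 :: (sdLead b).1, (sdLead b).2)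

def sdRun (st : Nat × Nat × Nat × Nat) : List Nat → List Char
  | [] => if st.1 = 0 then [] else [Char.ofNat 65533]
  | b :: r => (sdStep st b).1 ++ sdRun (sdStep st b).2 r

-- pos = {c: i for i, c in enumerate(alphabet)}; the indices are nonnegative, kept as Nat
def pvPos : PySem.Dict Char Nat :=
  (PySem.List.enumerate pvAlpha 0).foldl (fun d p => d.insert p.2 p.1.toNat) PySem.Dict.empty

-- loop body of B: state (acc, bits, out); 'if ch in pos: … pos[ch]' is the get? match
def pvStepB (st : Nat × Nat × List Nat) (ch : Char) : Nat × Nat × List Nat :=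
  match pvPos.get? ch with
  | some i =>
    let acc := (st.1 <<< 6) + i
    let bits := st.2.1 + 6
    if 8 ≤ bits then
      let bits := bits - 8
      -- byte, acc = divmod(acc, 1 << bits)
      let byte := acc / (1 <<< bits)
      let acc := acc % (1 <<< bits)
      (acc, bits, st.2.2 ++ [byte])
    else (acc, bits, st.2.2)
  | none => st

def secure_decode_alt (encoded : String) : String :=
  let st := encoded.toList.foldl pvStepB (0, 0, [])
  String.mk (sdRun (0, 0, 0, 0) st.2.2)

-- ===== PRECONDITION & SPEC =====
def Spec_secure_decode (encoded : String) (out : String) : Prop := out = secure_decode_alt encoded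
instance (encoded : String) (out : String) : Decidable (Spec_secure_decode encoded out) := by unfold Spec_secure_decode; infer_instance

-- ===== CLAIM (what is proved, stated in full; the proofs are below) =====
def Claim_equal_secure_decode : Prop := ∀ (encoded : String), Dom_secure_decode encoded → Spec_secure_decode encoded (secure_decode encoded)

-- ===== LEMMAS AND PROOFS =====

theorem sdRun_nil (st : Nat × Nat × Nat × Nat) :
    sdRun st [] = if st.1 = 0 then [] else [Char.ofNat 65533] := rfl

theorem sdRun_cons (st : Nat × Nat × Nat × Nat) (b : Nat) (r : List Nat) :
    sdRun st (b :: r) = (sdStep st b).1 ++ sdRun (sdStep st b).2 r := rfl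

theorem sdStep_fresh (b : Nat) : sdStep (0, 0, 0, 0) b = sdLead b := rfl

-- an out-of-range byte in mid-sequence: one U+FFFD, then the byte restarts the machine
theorem sdRun_bad (st : Nat × Nat × Nat × Nat) (c : Nat) (r : List Nat)
    (h0 : st.1 ≠ 0) (hc : ¬ (st.2.2.1 ≤ c ∧ c ≤ st.2.2.2)) :
    sdRun st (c :: r) = Char.ofNat 65533 :: sdRun (0, 0, 0, 0) (c :: r) := by
  rw [sdRun_cons, sdRun_cons, sdStep_fresh]
  unfold sdStep
  rw [if_neg h0, if_neg hc]
  simp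

theorem rep_char : Char.ofNat 65533 = '\uFFFD' := rfl

theorem pvUtf8_nil : pvUtf8 [] = [] := by rw [pvUtf8.eq_def]

theorem pvUtf8_cons (b : Nat) (r : List Nat) :
    pvUtf8 (b :: r) =
    (if b < 0x80 then Char.ofNat b :: pvUtf8 r
    else if b < 0xC2 then '\uFFFD' :: pvUtf8 r
    else if b < 0xE0 then
      match r with
      | c1 :: r1 =>
        if pvCont c1 then Char.ofNat ((b - 0xC0) * 64 + (c1 - 0x80)) :: pvUtf8 r1
        else '\uFFFD' :: pvUtf8 (c1 :: r1)
      | [] => ['\uFFFD']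
    else if b < 0xF0 then
      match r with
      | c1 :: r1 =>
        if (if b = 0xE0 then 0xA0 ≤ c1 && c1 ≤ 0xBF
            else if b = 0xED then 0x80 ≤ c1 && c1 ≤ 0x9F else pvCont c1) then
          match r1 with
          | c2 :: r2 =>
            if pvCont c2 then
              Char.ofNat ((b - 0xE0) * 4096 + (c1 - 0x80) * 64 + (c2 - 0x80)) :: pvUtf8 r2
            else '\uFFFD' :: pvUtf8 (c2 :: r2)
          | [] => ['\uFFFD']
        else '\uFFFD' :: pvUtf8 (c1 :: r1)
      | [] => ['\uFFFD']
    else if b < 0xF5 then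
      match r with
      | c1 :: r1 =>
        if (if b = 0xF0 then 0x90 ≤ c1 && c1 ≤ 0xBF
            else if b = 0xF4 then 0x80 ≤ c1 && c1 ≤ 0x8F else pvCont c1) then
          match r1 with
          | c2 :: r2 =>
            if pvCont c2 then
              match r2 with
              | c3 :: r3 =>
                if pvCont c3 then
                  Char.ofNat ((b - 0xF0) * 262144 + (c1 - 0x80) * 4096 +
                    (c2 - 0x80) * 64 + (c3 - 0x80)) :: pvUtf8 r3
                else '\uFFFD' :: pvUtf8 (c3 :: r3)
              | [] => ['\uFFFD']
            else '\uFFFD' :: pvUtf8 (c2 :: r2)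
          | [] => ['\uFFFD']
        else '\uFFFD' :: pvUtf8 (c1 :: r1)
      | [] => ['\uFFFD']
    else '\uFFFD' :: pvUtf8 r) := by rw [pvUtf8.eq_def]

-- the DFA decoder computes exactly A's nested-match decoder
theorem sdRun_eq (l : List Nat) : sdRun (0, 0, 0, 0) l = pvUtf8 l := by
  cases l with
  | nil => rw [sdRun_nil, pvUtf8_nil]; rfl
  | cons b r =>
    rw [sdRun_cons, sdStep_fresh, pvUtf8_cons]
    by_cases h1 : b < 128
    · rw [if_pos h1,
        show sdLead b = ([Char.ofNat b], (0, 0, 0, 0)) by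
          unfold sdLead; rw [if_pos (by omega)]]
      simp [sdRun_eq r]
    · by_cases h2 : b < 194
      · rw [if_neg (by omega), if_pos (by omega),
          show sdLead b = ([Char.ofNat 65533], (0, 0, 0, 0)) by
            unfold sdLead; rw [if_neg (by omega), if_pos (by omega)]]
        simp [sdRun_eq r, rep_char]
      · by_cases h3 : b < 224
        · -- two-byte lead
          rw [if_neg (by omega), if_neg (by omega), if_pos (by omega)]
          rw [show sdLead b = ([], (1, b - 192, 128, 191)) by
            unfold sdLead; rw [if_neg (by omega), if_neg (by omega), if_pos (by omega)]]
          rw [List.nil_append]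
          cases r with
          | nil => simp [sdRun_nil]
          | cons c1 r1 =>
            simp only []
            by_cases hc1 : 128 ≤ c1 ∧ c1 ≤ 191
            · rw [if_pos (show pvCont c1 = true by simp [pvCont]; omega),
                sdRun_cons,
                show sdStep (1, b - 192, 128, 191) c1
                    = ([Char.ofNat ((b - 192) * 64 + (c1 - 128))], (0, 0, 0, 0)) by
                  unfold sdStep; rw [if_neg (by simp), if_pos hc1, if_pos rfl],
                sdRun_eq r1]
              rfl
            · rw [if_neg (show ¬ pvCont c1 = true by simp [pvCont]; omega),
                sdRun_bad _ _ _ (by simp) hc1, sdRun_eq (c1 :: r1), rep_char]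
        · by_cases h4 : b < 240
          · -- three-byte lead
            rw [if_neg (by omega), if_neg (by omega), if_neg (by omega),
              if_pos (by omega)]
            rw [show sdLead b = ([], (2, b - 224,
                if b = 224 then 160 else 128, if b = 237 then 159 else 191)) by
              unfold sdLead
              rw [if_neg (by omega), if_neg (by omega), if_neg (by omega), if_pos (by omega)]]
            rw [List.nil_append]
            cases r with
            | nil => simp [sdRun_nil]
            | cons c1 r1 =>
              simp only []
              have hcond : ((if b = 0xE0 then 0xA0 ≤ c1 && c1 ≤ 0xBF
                  else if b = 0xED then 0x80 ≤ c1 && c1 ≤ 0x9F else pvCont c1) = true)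
                  ↔ ((if b = 224 then 160 else 128) ≤ c1 ∧
                     c1 ≤ (if b = 237 then 159 else 191)) := by
                by_cases hb0 : b = 224
                · simp [hb0]
                · by_cases hbd : b = 237
                  · simp [hbd, pvCont]
                  · simp [hb0, hbd, pvCont]
              by_cases hc1 : (if b = 224 then 160 else 128) ≤ c1 ∧
                  c1 ≤ (if b = 237 then 159 else 191)
              · rw [if_pos (hcond.mpr hc1), sdRun_cons,
                  show sdStep (2, b - 224, if b = 224 then 160 else 128,
                      if b = 237 then 159 else 191) c1
                      = ([], (1, (b - 224) * 64 + (c1 - 128), 128, 191)) by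
                    unfold sdStep
                    rw [if_neg (by simp), if_pos hc1, if_neg (by simp)]
                    simp,
                  List.nil_append]
                cases r1 with
                | nil => simp [sdRun_nil]
                | cons c2 r2 =>
                  simp only []
                  by_cases hc2 : 128 ≤ c2 ∧ c2 ≤ 191
                  · rw [if_pos (show pvCont c2 = true by simp [pvCont]; omega),
                      sdRun_cons,
                      show sdStep (1, (b - 224) * 64 + (c1 - 128), 128, 191) c2
                          = ([Char.ofNat (((b - 224) * 64 + (c1 - 128)) * 64 + (c2 - 128))],
                             (0, 0, 0, 0)) by
                        unfold sdStep; rw [if_neg (by simp), if_pos hc2, if_pos rfl],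
                      sdRun_eq r2]
                    have hv : ((b - 224) * 64 + (c1 - 128)) * 64 + (c2 - 128)
                        = (b - 0xE0) * 4096 + (c1 - 0x80) * 64 + (c2 - 0x80) := by ring
                    rw [hv]
                    rfl
                  · rw [if_neg (show ¬ pvCont c2 = true by simp [pvCont]; omega),
                      sdRun_bad _ _ _ (by simp) hc2, sdRun_eq (c2 :: r2), rep_char]
              · rw [if_neg (fun h => hc1 (hcond.mp h)),
                  sdRun_bad _ _ _ (by simp) hc1, sdRun_eq (c1 :: r1), rep_char]
          · by_cases h5 : b < 245
            · -- four-byte lead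
              rw [if_neg (by omega), if_neg (by omega), if_neg (by omega),
                if_neg (by omega), if_pos (by omega)]
              rw [show sdLead b = ([], (3, b - 240,
                  if b = 240 then 144 else 128, if b = 244 then 143 else 191)) by
                unfold sdLead
                rw [if_neg (by omega), if_neg (by omega), if_neg (by omega),
                  if_neg (by omega), if_pos (by omega)]]
              rw [List.nil_append]
              cases r with
              | nil => simp [sdRun_nil]
              | cons c1 r1 =>
                simp only []
                have hcond : ((if b = 0xF0 then 0x90 ≤ c1 && c1 ≤ 0xBF
                    else if b = 0xF4 then 0x80 ≤ c1 && c1 ≤ 0x8F else pvCont c1) = true)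
                    ↔ ((if b = 240 then 144 else 128) ≤ c1 ∧
                       c1 ≤ (if b = 244 then 143 else 191)) := by
                  by_cases hb0 : b = 240
                  · simp [hb0]
                  · by_cases hbd : b = 244
                    · simp [hbd, pvCont]
                    · simp [hb0, hbd, pvCont]
                by_cases hc1 : (if b = 240 then 144 else 128) ≤ c1 ∧
                    c1 ≤ (if b = 244 then 143 else 191)
                · rw [if_pos (hcond.mpr hc1), sdRun_cons,
                    show sdStep (3, b - 240, if b = 240 then 144 else 128,
                        if b = 244 then 143 else 191) c1
                        = ([], (2, (b - 240) * 64 + (c1 - 128), 128, 191)) by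
                      unfold sdStep
                      rw [if_neg (by simp), if_pos hc1, if_neg (by simp)]
                      simp,
                    List.nil_append]
                  cases r1 with
                  | nil => simp [sdRun_nil]
                  | cons c2 r2 =>
                    simp only []
                    by_cases hc2 : 128 ≤ c2 ∧ c2 ≤ 191
                    · rw [if_pos (show pvCont c2 = true by simp [pvCont]; omega),
                        sdRun_cons,
                        show sdStep (2, (b - 240) * 64 + (c1 - 128), 128, 191) c2
                            = ([], (1, ((b - 240) * 64 + (c1 - 128)) * 64 + (c2 - 128),
                                128, 191)) by
                          unfold sdStep; rw [if_neg (by simp), if_pos hc2, if_neg (by simp)]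
                          simp,
                        List.nil_append]
                      cases r2 with
                      | nil => simp [sdRun_nil]
                      | cons c3 r3 =>
                        simp only []
                        by_cases hc3 : 128 ≤ c3 ∧ c3 ≤ 191
                        · rw [if_pos (show pvCont c3 = true by simp [pvCont]; omega),
                            sdRun_cons,
                            show sdStep (1, ((b - 240) * 64 + (c1 - 128)) * 64
                                + (c2 - 128), 128, 191) c3
                                = ([Char.ofNat ((((b - 240) * 64 + (c1 - 128)) * 64
                                    + (c2 - 128)) * 64 + (c3 - 128))], (0, 0, 0, 0)) by
                              unfold sdStep
                              rw [if_neg (by simp), if_pos hc3, if_pos rfl],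
                            sdRun_eq r3]
                          have hv : (((b - 240) * 64 + (c1 - 128)) * 64 + (c2 - 128)) * 64
                              + (c3 - 128)
                              = (b - 0xF0) * 262144 + (c1 - 0x80) * 4096
                                + (c2 - 0x80) * 64 + (c3 - 0x80) := by ring
                          rw [hv]
                          rfl
                        · rw [if_neg (show ¬ pvCont c3 = true by simp [pvCont]; omega),
                            sdRun_bad _ _ _ (by simp) hc3, sdRun_eq (c3 :: r3), rep_char]
                    · rw [if_neg (show ¬ pvCont c2 = true by simp [pvCont]; omega),
                        sdRun_bad _ _ _ (by simp) hc2, sdRun_eq (c2 :: r2), rep_char]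
                · rw [if_neg (fun h => hc1 (hcond.mp h)),
                    sdRun_bad _ _ _ (by simp) hc1, sdRun_eq (c1 :: r1), rep_char]
            · rw [if_neg (by omega), if_neg (by omega), if_neg (by omega),
                if_neg (by omega), if_neg (by omega),
                show sdLead b = ([Char.ofNat 65533], (0, 0, 0, 0)) by
                  unfold sdLead
                  rw [if_neg (by omega), if_neg (by omega), if_neg (by omega),
                    if_neg (by omega), if_neg (by omega)]]
              simp [sdRun_eq r, rep_char]
termination_by l.length
decreasing_by all_goals simp <;> omega

theorem pvInt2_go (l : List Bool) (a : Nat) :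
    l.foldl (fun a b => a * 2 + (if b then 1 else 0)) a = a * 2 ^ l.length + pvInt2 l := by
  induction l generalizing a with
  | nil => simp [pvInt2]
  | cons b t ih =>
    simp only [List.foldl_cons, List.length_cons]
    rw [ih]
    have h0 : pvInt2 (b :: t) = List.foldl (fun a b => a * 2 + if b = true then 1 else 0) (0 * 2 + if b = true then 1 else 0) t := rfl
    rw [h0, ih, pow_succ]
    split <;> ring

theorem pvInt2_append (xs ys : List Bool) :
    pvInt2 (xs ++ ys) = pvInt2 xs * 2 ^ ys.length + pvInt2 ys := by
  unfold pvInt2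
  rw [List.foldl_append]
  rw [pvInt2_go ys]
  rfl

theorem pvInt2_lt (l : List Bool) : pvInt2 l < 2 ^ l.length := by
  induction l with
  | nil => simp [pvInt2]
  | cons b t ih =>
    have h0 : pvInt2 (b :: t) = List.foldl (fun a b => a * 2 + if b = true then 1 else 0) (0 * 2 + if b = true then 1 else 0) t := rfl
    rw [h0, pvInt2_go t]
    have h2 : (2 : Nat) ^ (b :: t).length = 2 ^ t.length + 2 ^ t.length := by
      simp [List.length_cons, pow_succ]; ring
    rw [h2]
    split <;> omega

theorem pvInt2_fmt6 (i : Nat) (h : i < 64) : pvInt2 (pvFmt6 i) = i := by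
  interval_cases i <;> decide

-- A's bit-building loop produces the concatenation of the 6-bit groups of the alphabet indices
theorem A_binary (l : List Char) (acc : List Bool) :
    l.foldl (fun bin ch =>
      if pvAlpha.contains ch then
        bin ++ pvFmt6 ((PySem.List.index? pvAlpha ch).getD 0)
      else bin) acc
    = acc ++ (l.filterMap (fun c => PySem.List.index? pvAlpha c)).flatMap pvFmt6 := by
  induction l generalizing acc with
  | nil => simp
  | cons c t ih =>
    simp only [List.foldl_cons]
    by_cases hc : c ∈ pvAlpha
    · have hcon : pvAlpha.contains c = true := by
        simpa [List.contains_iff_mem] using hc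
      obtain ⟨i, hi⟩ := Option.isSome_iff_exists.mp
        ((PySem.List.index?_isSome_iff pvAlpha c).mpr hc)
      rw [if_pos hcon, ih, List.filterMap_cons, hi]
      simp [List.append_assoc]
    · have hcon : pvAlpha.contains c = false := by
        simpa [List.contains_iff_mem] using hc
      have hnone : PySem.List.index? pvAlpha c = none :=
        (PySem.List.index?_eq_none_iff pvAlpha c).mpr hc
      rw [if_neg (by simpa [List.contains_iff_mem] using hc), ih, List.filterMap_cons, hnone]

-- trimming the trailing sub-byte remainder does not change the byte grouping
theorem pvBytes8_trim (l : List Bool) :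
    pvBytes8 (l.take (l.length - l.length % 8)) = pvBytes8 l := by
  by_cases h8 : 8 ≤ l.length
  · have hm : l.length % 8 < 8 := Nat.mod_lt _ (by omega)
    have hlen : (l.take (l.length - l.length % 8)).length = l.length - l.length % 8 := by
      simp
    have h1 : 8 ≤ (l.take (l.length - l.length % 8)).length := by
      rw [hlen]; omega
    conv_lhs => rw [pvBytes8]
    conv_rhs => rw [pvBytes8]
    rw [dif_pos h1, dif_pos h8]
    have htake : (l.take (l.length - l.length % 8)).take 8 = l.take 8 := by
      rw [List.take_take]
      congr 1
      omega
    have hdrop : (l.take (l.length - l.length % 8)).drop 8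
        = (l.drop 8).take ((l.drop 8).length - (l.drop 8).length % 8) := by
      rw [List.drop_take]
      congr 1
      simp
      omega
    rw [htake, hdrop, pvBytes8_trim (l.drop 8)]
  · conv_lhs => rw [pvBytes8]
    conv_rhs => rw [pvBytes8]
    rw [dif_neg h8, dif_neg (by simp; omega)]
termination_by l.length
decreasing_by simp; omega

-- first-match scan of the enumerated association list is the first index (shifted by the start)
theorem dictEnum_get (l : List Char) (s : Nat) (ch : Char) :
    (PySem.Dict.mk ((PySem.List.enumerate l (s : Int)).map (fun p => (p.2, p.1.toNat)))).get? ch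
    = (PySem.List.index? l ch).map (· + s) := by
  induction l generalizing s with
  | nil =>
    rw [(PySem.List.index?_eq_none_iff [] ch).mpr (by simp)]
    simp [PySem.List.enumerate]
    rfl
  | cons c t ih =>
    rw [PySem.List.enumerate_cons, List.map_cons, PySem.Dict.get?_mk_cons]
    by_cases hc : c = ch
    · subst hc
      rw [PySem.List.index?_cons_self]
      simp
    · rw [if_neg (by simpa using hc)]
      have hs : (s : Int) + 1 = ((s + 1 : Nat) : Int) := by push_cast; ring
      rw [hs, ih (s + 1), PySem.List.index?_cons_of_ne t hc]
      cases PySem.List.index? t ch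
      · simp
      · simp
        omega

-- pos[ch] is alphabet.index(ch)
theorem pvPos_get? (ch : Char) : pvPos.get? ch = PySem.List.index? pvAlpha ch := by
  have hfresh : ∀ p ∈ PySem.List.enumerate pvAlpha (0 : Int),
      (PySem.Dict.empty : PySem.Dict Char Nat).contains p.2 = false := by
    intro p _; exact PySem.Dict.contains_empty ..
  have hnd : ((PySem.List.enumerate pvAlpha (0 : Int)).map (·.2)).Nodup := by
    rw [PySem.List.map_snd_enumerate]
    decide
  have hitems : pvPos.items
      = (PySem.List.enumerate pvAlpha (0 : Int)).map (fun p => (p.2, p.1.toNat)) := by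
    unfold pvPos
    rw [PySem.Dict.items_foldl_insert_fresh (PySem.List.enumerate pvAlpha (0 : Int))
      (fun p => p.2) (fun p => p.1.toNat) PySem.Dict.empty hfresh hnd]
    rfl
  have hmk : pvPos = PySem.Dict.mk ((PySem.List.enumerate pvAlpha (0 : Int)).map
      (fun p => (p.2, p.1.toNat))) := by
    apply PySem.Dict.ext
    simp [hitems]
  rw [hmk]
  have h0 : ((0 : Nat) : Int) = (0 : Int) := rfl
  rw [← h0, dictEnum_get pvAlpha 0 ch]
  cases PySem.List.index? pvAlpha ch <;> simp

-- every index coming out of the alphabet lookup is < 64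
theorem mem_filterMap_lt (l : List Char) (i : Nat)
    (h : i ∈ l.filterMap (fun c => PySem.List.index? pvAlpha c)) : i < 64 := by
  rw [List.mem_filterMap] at h
  obtain ⟨c, _, hc⟩ := h
  obtain ⟨hk, -, -⟩ := PySem.List.getElem_of_index?_eq_some hc
  simpa [pvAlpha] using hk

-- the accumulator invariant of B's single pass
theorem B_inv (J : List Nat) (hJ : ∀ i ∈ J, i < 64) (p : List Bool) (hp : p.length < 8)
    (out : List Nat) :
    (J.foldl (fun st i =>
        let acc := (st.1 <<< 6) + i
        let bits := st.2.1 + 6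
        if 8 ≤ bits then
          (acc % (1 <<< (bits - 8)), bits - 8, st.2.2 ++ [acc / (1 <<< (bits - 8))])
        else (acc, bits, st.2.2)) (pvInt2 p, p.length, out)).2.2
    = out ++ pvBytes8 (p ++ J.flatMap pvFmt6) := by
  induction J generalizing p out with
  | nil =>
    simp only [List.foldl_nil, List.flatMap_nil, List.append_nil]
    rw [pvBytes8, dif_neg (by omega)]
    simp
  | cons i J' ih =>
    have hi : i < 64 := hJ i (List.mem_cons_self ..)
    have hJ' : ∀ j ∈ J', j < 64 := fun j hj => hJ j (List.mem_cons_of_mem _ hj)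
    have hq : pvInt2 (p ++ pvFmt6 i) = pvInt2 p * 64 + i := by
      rw [pvInt2_append, pvInt2_fmt6 i hi]
      norm_num [pvFmt6]
    have hacc : (pvInt2 p <<< 6) + i = pvInt2 (p ++ pvFmt6 i) := by
      rw [Nat.shiftLeft_eq, hq]
    have hlq : (p ++ pvFmt6 i).length = p.length + 6 := by simp [pvFmt6]
    simp only [List.foldl_cons, List.flatMap_cons]
    by_cases h8 : 8 ≤ p.length + 6
    · rw [if_pos h8]
      have hk : (p ++ pvFmt6 i).length - 8 = p.length + 6 - 8 := by omega
      have hsplit : pvInt2 (p ++ pvFmt6 i)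
          = pvInt2 ((p ++ pvFmt6 i).take 8) * 2 ^ (p.length + 6 - 8)
            + pvInt2 ((p ++ pvFmt6 i).drop 8) := by
        conv_lhs => rw [← List.take_append_drop 8 (p ++ pvFmt6 i)]
        rw [pvInt2_append, List.length_drop, hlq]
      have hrem : pvInt2 ((p ++ pvFmt6 i).drop 8) < 2 ^ (p.length + 6 - 8) := by
        have := pvInt2_lt ((p ++ pvFmt6 i).drop 8)
        rwa [List.length_drop, hlq] at this
      have hpow : (1 : Nat) <<< (p.length + 6 - 8) = 2 ^ (p.length + 6 - 8) := by
        rw [Nat.one_shiftLeft]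
      have hdiv : ((pvInt2 p <<< 6) + i) / (1 <<< (p.length + 6 - 8))
          = pvInt2 ((p ++ pvFmt6 i).take 8) := by
        rw [hacc, hpow, hsplit, Nat.add_comm, Nat.add_mul_div_right _ _ (by positivity),
          Nat.div_eq_of_lt hrem]
        omega
      have hmod : ((pvInt2 p <<< 6) + i) % (1 <<< (p.length + 6 - 8))
          = pvInt2 ((p ++ pvFmt6 i).drop 8) := by
        rw [hacc, hpow, hsplit, Nat.add_comm, Nat.add_mul_mod_self_right,
          Nat.mod_eq_of_lt hrem]
      have hld : ((p ++ pvFmt6 i).drop 8).length = p.length + 6 - 8 := by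
        rw [List.length_drop, hlq]
      rw [hdiv, hmod]
      have := ih hJ' ((p ++ pvFmt6 i).drop 8) (by rw [hld]; omega)
        (out ++ [pvInt2 ((p ++ pvFmt6 i).take 8)])
      rw [hld] at this
      rw [this]
      have h8q : 8 ≤ ((p ++ pvFmt6 i) ++ List.flatMap pvFmt6 J').length := by
        rw [List.length_append, hlq]
        omega
      conv_rhs => rw [← List.append_assoc, pvBytes8, dif_pos h8q]
      rw [List.take_append_of_le_length (l₁ := p ++ pvFmt6 i)
          (l₂ := List.flatMap pvFmt6 J') (by rw [hlq]; omega),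
        List.drop_append_of_le_length (l₁ := p ++ pvFmt6 i)
          (l₂ := List.flatMap pvFmt6 J') (by rw [hlq]; omega)]
      simp
    · rw [if_neg h8]
      have := ih hJ' (p ++ pvFmt6 i) (by omega : (p ++ pvFmt6 i).length < 8) out
      rw [hlq] at this
      rw [hacc, this, List.append_assoc]

-- B's fold over the characters equals the index fold over the looked-up indices
theorem B_fold (l : List Char) (st : Nat × Nat × List Nat) :
    l.foldl pvStepB st
    = (l.filterMap (fun c => PySem.List.index? pvAlpha c)).foldl (fun st i =>
        let acc := (st.1 <<< 6) + i
        let bits := st.2.1 + 6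
        if 8 ≤ bits then
          (acc % (1 <<< (bits - 8)), bits - 8, st.2.2 ++ [acc / (1 <<< (bits - 8))])
        else (acc, bits, st.2.2)) st := by
  induction l generalizing st with
  | nil => rfl
  | cons c t ih =>
    simp only [List.foldl_cons, List.filterMap_cons]
    cases h : PySem.List.index? pvAlpha c with
    | none =>
      have hs : pvStepB st c = st := by
        unfold pvStepB
        rw [pvPos_get?, h]
      rw [hs, ih]
    | some i =>
      have hs : pvStepB st c
          = (let acc := (st.1 <<< 6) + i
             let bits := st.2.1 + 6
             if 8 ≤ bits then
               (acc % (1 <<< (bits - 8)), bits - 8, st.2.2 ++ [acc / (1 <<< (bits - 8))])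
             else (acc, bits, st.2.2)) := by
        unfold pvStepB
        rw [pvPos_get?, h]
      rw [List.foldl_cons, hs, ih]

-- ===== VERDICT (by name: the statement is the Claim_ definition above) =====
theorem secure_decode_spec : Claim_equal_secure_decode := by
  unfold Claim_equal_secure_decode Spec_secure_decode
  intro encoded _
  unfold secure_decode secure_decode_alt
  rw [A_binary encoded.toList [], B_fold encoded.toList (0, 0, [])]
  simp only [List.nil_append]
  have hB := B_inv (encoded.toList.filterMap (fun c => PySem.List.index? pvAlpha c))
    (fun i hi => mem_filterMap_lt encoded.toList i hi) [] (by simp) []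
  simp only [pvInt2, List.foldl_nil, List.length_nil, List.nil_append] at hB
  rw [hB, sdRun_eq]
  by_cases hr : ((encoded.toList.filterMap
      (fun c => PySem.List.index? pvAlpha c)).flatMap pvFmt6).length % 8 ≠ 0
  · rw [if_pos hr, pvBytes8_trim]
  · rw [if_neg hr]
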